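-- pv_equiv track=rewrite | github.com/mguilmot/LDMS | 01_checkLDMS.py | chars2line
-- ===== SOURCE A (Python) =====
-- def chars2line(text=""):
--     chars = ""
--     for char in text:
--         if char == "\n":
--             chars += char
--             line = chars
--             chars = ""
--             yield line
--         else:
--             chars += char
-- ===== SOURCE B (Python) =====
-- def chars2line(text=""):
--     # split once, yield every complete line with its newline re-attached
--     parts = text.split("\n")
--     for p in parts[:-1]:
--         yield p + "\n"
-- ===== Notes on version B (the rewrite author's own statement) =====
-- stated objective: faster
-- what changed: Replaces the per-character string accumulation with a single split on the newline character followed by re-attaching the separator to each complete segment.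
import Mathlib
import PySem

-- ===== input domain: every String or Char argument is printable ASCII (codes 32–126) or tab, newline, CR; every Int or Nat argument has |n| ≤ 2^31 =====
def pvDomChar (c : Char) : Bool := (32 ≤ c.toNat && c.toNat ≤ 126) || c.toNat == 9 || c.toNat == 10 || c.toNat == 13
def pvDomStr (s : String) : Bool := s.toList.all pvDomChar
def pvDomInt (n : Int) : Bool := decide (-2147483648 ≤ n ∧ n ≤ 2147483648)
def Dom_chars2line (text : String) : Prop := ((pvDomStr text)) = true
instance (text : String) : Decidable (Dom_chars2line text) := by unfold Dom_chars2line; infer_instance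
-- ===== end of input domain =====

-- B replaces A's per-character accumulation with a single split('\n'); objective: faster (constant-factor, one pass, no repeated concatenation).

-- ===== PORT A =====
-- the generator's accumulated string `chars` is modelled as a List Char; each yield produces the finished line
def chars2lineGo : List Char → List Char → List String
  | _chars, [] => []
  | chars, c :: rest =>
      if c = '\n' then (String.ofList (chars ++ [c])) :: chars2lineGo [] rest
      else chars2lineGo (chars ++ [c]) rest

def chars2line (text : String) : List String := chars2lineGo [] text.toList

-- ===== PORT B =====
def chars2line_alt (text : String) : List String :=
  match PySem.Str.split? text "\n" with
  | some parts => parts.dropLast.map (fun p => p ++ "\n")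
  | none => []

-- ===== PRECONDITION & SPEC =====
def Spec_chars2line (text : String) (out : List String) : Prop := out = chars2line_alt text
instance (text : String) (out : List String) : Decidable (Spec_chars2line text out) := by unfold Spec_chars2line; infer_instance

-- ===== CLAIM (what is proved, stated in full; the proofs are below) =====
def Claim_equal_chars2line : Prop := ∀ (text : String), Dom_chars2line text → Spec_chars2line text (chars2line text)

-- ===== LEMMAS AND PROOFS =====

-- reference splitter: `sa cur l` = the '\n'-separated segments of `cur ++ l`
def sa : List Char → List Char → List (List Char)
  | cur, [] => [cur]
  | cur, c :: r => if c = '\n' then cur :: sa [] r else sa (cur ++ [c]) r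

theorem sa_ne_nil (l cur : List Char) : sa cur l ≠ [] := by
  induction l generalizing cur with
  | nil => simp [sa]
  | cons c r ih => simp only [sa]; split_ifs <;> simp_all

theorem goA_eq (l chars : List Char) :
    chars2lineGo chars l = ((sa chars l).dropLast).map (fun p => String.ofList (p ++ ['\n'])) := by
  induction l generalizing chars with
  | nil => simp [chars2lineGo, sa]
  | cons c r ih =>
    simp only [chars2lineGo, sa]
    split_ifs with h
    · subst h
      rw [List.dropLast_cons_of_ne_nil (sa_ne_nil r [])]
      simp [ih]
    · exact ih (chars ++ [c])

theorem go_eq_sa (l : List Char) : ∀ (fuel : Nat) (cur : List Char) (acc : List (List Char)),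
    l.length ≤ fuel →
    PySem.Chars.splitOn.go ['\n'] fuel l cur acc = acc.reverse ++ sa cur.reverse l := by
  induction l with
  | nil =>
    intro fuel cur acc _
    cases fuel <;> simp [PySem.Chars.splitOn.go, sa]
  | cons c r ih =>
    intro fuel cur acc hf
    cases fuel with
    | zero => simp at hf
    | succ f =>
      simp only [PySem.Chars.splitOn.go]
      by_cases h : c = '\n'
      · subst h
        have hp : List.isPrefixOf ['\n'] ('\n' :: r) = true := by simp [List.isPrefixOf]
        rw [if_pos hp]
        have hd : List.drop (['\n'].length) ('\n' :: r) = r := rfl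
        rw [hd]
        simp only [List.length_cons] at hf
        rw [ih f [] (cur.reverse :: acc) (by omega)]
        simp [sa]
      · have hp : List.isPrefixOf ['\n'] (c :: r) = false := by
          simp only [List.isPrefixOf, Bool.and_eq_false_iff]
          exact Or.inl (beq_eq_false_iff_ne.mpr fun e => h e.symm)
        rw [if_neg (by simp [hp])]
        simp only [List.length_cons] at hf
        rw [ih f (c :: cur) acc (by omega)]
        simp [sa, h]

theorem splitOn_eq_sa (l : List Char) : PySem.Chars.splitOn l ['\n'] = sa [] l := by
  unfold PySem.Chars.splitOn
  rw [go_eq_sa l (l.length + 1) [] [] (by omega)]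
  simp

-- ===== VERDICT (by name: the statement is the Claim_ definition above) =====
theorem chars2line_spec : Claim_equal_chars2line := by
  intro text _
  unfold Spec_chars2line chars2line chars2line_alt
  rw [goA_eq]
  have h : PySem.Str.split? text "\n" =
      some ((sa [] text.toList).map String.ofList) := by
    unfold PySem.Str.split?
    rw [show ("\n" : String).toList = ['\n'] from rfl]
    rw [show PySem.Chars.split? text.toList ['\n'] = some (PySem.Chars.splitOn text.toList ['\n']) from by
      simp [PySem.Chars.split?]]
    rw [splitOn_eq_sa]
    rfl
  rw [h]
  show _ = List.map (fun p => p ++ "\n") ((List.map String.ofList (sa [] text.toList)).dropLast)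
  rw [← List.map_dropLast, List.map_map]
  apply List.map_congr_left
  intro p _
  show String.ofList (p ++ ['\n']) = String.ofList p ++ "\n"
  apply String.toList_injective
  simp
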